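-- pv_equiv track=rewrite | github.com/plex1/aig-opt | src/aig_opt/npn.py | permute_tt
-- ===== SOURCE A (Python) =====
-- _PERM_MAPS: dict[tuple[int, tuple[int, ...]], tuple[int, ...]] = {}
--
-- def _build_perm_map(n: int, perm: tuple[int, ...]) -> tuple[int, ...]:
--     """Build index mapping for a permutation: result[old_idx] = new_idx."""
--     mapping = []
--     for i in range(1 << n):
--         j = 0
--         for p in range(n):
--             if (i >> perm[p]) & 1:
--                 j |= (1 << p)
--         mapping.append(j)
--     return tuple(mapping)
--
-- def permute_tt(tt: int, perm: tuple[int, ...], n: int) -> int: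
--     """Permute input variables using precomputed index mapping."""
--     mapping = _PERM_MAPS.get((n, perm))
--     if mapping is None:
--         mapping = _build_perm_map(n, perm)
--     result = 0
--     while tt:
--         i = (tt & -tt).bit_length() - 1  # lowest set bit
--         result |= 1 << mapping[i]
--         tt &= tt - 1  # clear lowest set bit
--     return result
-- ===== SOURCE B (Python) =====
-- def permute_tt(tt, perm, n):
--     """Permute input variables: one fused pass over all 2**n indices, no precomputed table."""
--     result = 0
--     for i in range(1 << n):
--         if (tt >> i) & 1:
--             j = 0
--             for p in range(n):
--                 if (i >> perm[p]) & 1: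
--                     j |= 1 << p
--             result |= 1 << j
--     return result
-- ===== Notes on version B (the rewrite author's own statement) =====
-- stated objective: alternative
-- what changed: Drops A's build-full-index-table-then-scatter-over-set-bits scheme (while-loop extracting the lowest set bit of tt and clearing it) for a single fused pass over all 2**n table indices that computes each permuted index inline only when the corresponding bit of tt is set.
import Mathlib
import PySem

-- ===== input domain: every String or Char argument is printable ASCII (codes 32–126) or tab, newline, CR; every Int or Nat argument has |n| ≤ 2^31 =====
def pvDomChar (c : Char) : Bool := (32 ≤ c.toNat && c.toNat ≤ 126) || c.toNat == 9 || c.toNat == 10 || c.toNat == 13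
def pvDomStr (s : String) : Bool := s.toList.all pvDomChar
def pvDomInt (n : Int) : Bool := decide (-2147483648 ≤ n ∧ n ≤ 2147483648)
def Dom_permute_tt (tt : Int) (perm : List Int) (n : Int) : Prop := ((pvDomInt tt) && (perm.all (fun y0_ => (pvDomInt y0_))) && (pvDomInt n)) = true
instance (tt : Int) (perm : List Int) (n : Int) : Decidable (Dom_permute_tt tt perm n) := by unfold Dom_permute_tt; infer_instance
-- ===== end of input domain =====

-- B replaces A's build-full-index-table-then-scatter-over-set-bits scheme with one fused pass
-- over all 2^n indices, computing each permuted index inline (objective: alternative, same cost).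

-- ===== PORT A =====
-- The module-level `_PERM_MAPS` cache is empty at import time and never written, so
-- `_PERM_MAPS.get(...)` is always None and `_build_perm_map` is always called; ported so.
-- `(i >> perm[p])`: Python raises for a negative shift count / out-of-range index; both are
-- excluded by Pre_, so the `.toNat` clamp / pyGetD default are never exercised under Pre_.
def pvBuildPermMap (n : Int) (perm : List Int) : List Int :=
  (PySem.List.pyRange 0 ((1 : Int) <<< n.toNat) 1).foldl
    (fun (mapping : List Int) (i : Int) => mapping ++
      [(PySem.List.pyRange 0 n 1).foldl
         (fun (j p : Int) => if PySem.Int.band (i >>> (PySem.List.pyGetD perm p 0).toNat) 1 ≠ 0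
                     then PySem.Int.bor j ((1 : Int) <<< p.toNat) else j) 0]) []

-- termination of the `while tt:` loop (clearing the lowest set bit strictly decreases tt > 0)
theorem pv_band_pred_lt (tt : Int) (h : 0 < tt) :
    (PySem.Int.band tt (tt - 1)).toNat < tt.toNat := by
  rw [PySem.Int.band_of_nonneg (by omega) (by omega)]
  have hle := Nat.and_le_right (n := tt.toNat) (m := (tt - 1).toNat)
  omega

-- `while tt:` — for tt < 0 the Python loop never reaches 0 (excluded by Pre_); the guard
-- `tt ≤ 0` stops at exactly tt = 0 on the admitted inputs.
def pvPermLoop (tt : Int) (mapping : List Int) (result : Int) : Int :=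
  if h : tt ≤ 0 then result
  else
    pvPermLoop (PySem.Int.band tt (tt - 1)) mapping
      (PySem.Int.bor result ((1 : Int) <<<
        (PySem.List.pyGetD mapping
          ((PySem.Int.bitLength (PySem.Int.band tt (-tt)) - 1 : Nat) : Int) 0).toNat))
termination_by tt.toNat
decreasing_by exact pv_band_pred_lt tt (by omega)

def permute_tt (tt : Int) (perm : List Int) (n : Int) : Int :=
  pvPermLoop tt (pvBuildPermMap n perm) 0

-- ===== PORT B =====
def permute_tt_alt (tt : Int) (perm : List Int) (n : Int) : Int :=
  (PySem.List.pyRange 0 ((1 : Int) <<< n.toNat) 1).foldl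
    (fun (result i : Int) =>
      if PySem.Int.band (tt >>> i.toNat) 1 ≠ 0 then
        PySem.Int.bor result ((1 : Int) <<<
          ((PySem.List.pyRange 0 n 1).foldl
            (fun (j p : Int) => if PySem.Int.band (i >>> (PySem.List.pyGetD perm p 0).toNat) 1 ≠ 0
                        then PySem.Int.bor j ((1 : Int) <<< p.toNat) else j) 0).toNat)
      else result) 0

-- ===== PRECONDITION & SPEC =====
-- Exactly the inputs on which the Python A returns: tt ≥ 0 (a negative tt never terminates /
-- eventually indexes past the table), n ≥ 0 (`1 << n` raises), the first n entries of perm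
-- exist and are nonnegative (IndexError / negative shift), and tt < 2^(2^n) (else the table
-- lookup `mapping[i]` raises IndexError); the last bound is written with nested log2 so that
-- deciding it never computes the tower 2^(2^n).
def Pre_permute_tt (tt : Int) (perm : List Int) (n : Int) : Prop :=
  0 ≤ tt ∧ 0 ≤ n ∧ n ≤ perm.length ∧ (∀ p ∈ perm.take n.toNat, 0 ≤ p) ∧
    (tt.toNat.log2 = 0 ∨ tt.toNat.log2.log2 < n.toNat)
instance (tt : Int) (perm : List Int) (n : Int) : Decidable (Pre_permute_tt tt perm n) := by
  unfold Pre_permute_tt; infer_instance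
def pvWitness_permute_tt : Int × List Int × Int := (5, ([1, 0], 2))

def Spec_permute_tt (tt : Int) (perm : List Int) (n : Int) (out : Int) : Prop :=
  out = permute_tt_alt tt perm n
instance (tt : Int) (perm : List Int) (n : Int) (out : Int) : Decidable (Spec_permute_tt tt perm n out) := by
  unfold Spec_permute_tt; infer_instance

-- ===== CLAIM (what is proved, stated in full; the proofs are below) =====
def Claim_equal_permute_tt : Prop := ∀ (tt : Int) (perm : List Int) (n : Int),
  Dom_permute_tt tt perm n → Pre_permute_tt tt perm n →
    Spec_permute_tt tt perm n (permute_tt tt perm n)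

-- ===== LEMMAS AND PROOFS =====

theorem pv_foldl_skip {α : Type} (c : Nat → Bool) (g : α → Nat → α) :
    ∀ (l : List Nat) (r : α), (∀ i ∈ l, c i = false) →
      l.foldl (fun r i => if c i then g r i else r) r = r := by
  intro l
  induction l with
  | nil => intro r _; rfl
  | cons x xs ih =>
      intro r h
      simp only [List.foldl_cons, h x (by simp)]
      exact ih r fun i hi => h i (by simp [hi])

theorem pv_foldl_cond_congr {α : Type} (c c' : Nat → Bool) (g : α → Nat → α) :
    ∀ (l : List Nat) (r : α), (∀ i ∈ l, c i = c' i) →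
      l.foldl (fun r i => if c i then g r i else r) r =
        l.foldl (fun r i => if c' i then g r i else r) r := by
  intro l
  induction l with
  | nil => intro r _; rfl
  | cons x xs ih =>
      intro r h
      simp only [List.foldl_cons, h x (by simp)]
      exact ih _ fun i hi => h i (by simp [hi])

-- bit profiles around the lowest set bit: t = 2^k * o with o odd
theorem pv_testBit_mul (k o j : Nat) :
    (2 ^ k * o).testBit j = if j < k then false else o.testBit (j - k) := by
  have := Nat.testBit_two_pow_mul_add o (b := 0) (i := k) (by positivity) j
  simpa using this

theorem pv_testBit_pred (k o j : Nat) (ho : o % 2 = 1) :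
    (2 ^ k * o - 1).testBit j = if j < k then true else (o - 1).testBit (j - k) := by
  have h1 : 2 ^ k * o - 1 = 2 ^ k * (o - 1) + (2 ^ k - 1) := by
    have hp : 0 < 2 ^ k := by positivity
    have : 2 ^ k * o = 2 ^ k * (o - 1) + 2 ^ k := by
      rw [Nat.mul_sub, Nat.mul_one]
      have : 2 ^ k ≤ 2 ^ k * o := Nat.le_mul_of_pos_right _ (by omega)
      omega
    omega
  have hp : 0 < 2 ^ k := by positivity
  rw [h1, Nat.testBit_two_pow_mul_add _ (by omega) j]
  by_cases hj : j < k
  · simp [hj, Nat.testBit_two_pow_sub_one]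
  · simp [hj]

theorem pv_testBit_odd_succ (o m : Nat) (ho : o % 2 = 1) (hm : 1 ≤ m) :
    o.testBit m = (o - 1).testBit m := by
  obtain ⟨m', rfl⟩ : ∃ m', m = m' + 1 := ⟨m - 1, by omega⟩
  rw [Nat.testBit_add_one, Nat.testBit_add_one]
  congr 1
  omega

theorem pv_land_pred (k o : Nat) (ho : o % 2 = 1) :
    2 ^ k * o &&& (2 ^ k * o - 1) = 2 ^ k * (o - 1) := by
  apply Nat.eq_of_testBit_eq
  intro j
  rw [Nat.testBit_land, pv_testBit_mul, pv_testBit_pred k o j ho, pv_testBit_mul]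
  by_cases hj : j < k
  · simp [hj]
  · simp only [hj, if_false]
    by_cases hjk : j - k = 0
    · rw [hjk]
      have : (o - 1).testBit 0 = false := Nat.mod_two_eq_zero_iff_testBit_zero.mp (by omega)
      simp [this]
    · rw [← pv_testBit_odd_succ o (j - k) ho (by omega)]
      cases o.testBit (j - k) <;> simp

theorem pv_sub_land_pred (k o : Nat) (ho : o % 2 = 1) :
    2 ^ k * o - (2 ^ k * o &&& (2 ^ k * o - 1)) = 2 ^ k := by
  rw [pv_land_pred k o ho, Nat.mul_sub, Nat.mul_one]
  exact Nat.sub_sub_self (Nat.le_mul_of_pos_right _ (by omega))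

theorem pv_bitLength_two_pow (k : Nat) : PySem.Int.bitLength ((2 ^ k : Nat) : Int) = k + 1 := by
  have h1 := PySem.Int.lt_two_pow_bitLength ((2 ^ k : Nat) : Int)
  have h2 := PySem.Int.two_pow_bitLength_le ((2 ^ k : Nat) : Int) (by positivity)
  rw [Int.natAbs_natCast] at h1 h2
  have hk1 : k < PySem.Int.bitLength ((2 ^ k : Nat) : Int) :=
    (Nat.pow_lt_pow_iff_right (by norm_num)).mp h1
  have hk2 : PySem.Int.bitLength ((2 ^ k : Nat) : Int) - 1 ≤ k :=
    (Nat.pow_le_pow_iff_right (by norm_num)).mp h2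
  omega

-- Python's `t & -t` on a positive t, through PySem's two's-complement band
theorem pv_band_neg (t : Nat) (ht : 0 < t) :
    PySem.Int.band (t : Int) (-(t : Int)) = ((t - (t &&& (t - 1)) : Nat) : Int) := by
  have h0 : ¬ (0 ≤ -(t : Int)) := by omega
  rw [PySem.Int.band]
  simp only [if_pos (by positivity : (0:Int) ≤ (t:Int)), if_neg h0]
  have e1 : ((t : Int)).toNat = t := by omega
  have e2 : (-(-(t : Int)) - 1).toNat = t - 1 := by omega
  rw [e1, e2]

theorem pv_band_natCast_pred (t : Nat) (ht : 0 < t) :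
    PySem.Int.band (t : Int) ((t : Int) - 1) = ((t &&& (t - 1) : Nat) : Int) := by
  have e : ((t : Int) - 1) = ((t - 1 : Nat) : Int) := by omega
  rw [e, PySem.Int.band_natCast]

-- the B-side bit test is Nat.testBit
theorem pv_cond_testBit (t k : Nat) :
    (decide (PySem.Int.band ((t : Int) >>> k) 1 ≠ 0)) = t.testBit k := by
  have h1 : ((t : Int) >>> k) = ((t >>> k : Nat) : Int) := (Int.natCast_shiftRight t k).symm
  rw [h1]
  have h2 : PySem.Int.band ((t >>> k : Nat) : Int) 1 = ((t >>> k &&& 1 : Nat) : Int) := by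
    exact_mod_cast PySem.Int.band_natCast (t >>> k) 1
  rw [h2]
  rw [Nat.and_one_is_mod, Nat.testBit, Nat.one_and_eq_mod_two]
  rcases Nat.mod_two_eq_zero_or_one (t >>> k) with h | h <;> simp [h]

-- ===== the core loop lemma: A's while-loop equals a fold over all indices =====
theorem pv_loop_eq (mapping : List Int) (M : Nat) :
    ∀ (t : Nat), t < 2 ^ M → ∀ (r : Int),
      pvPermLoop (t : Int) mapping r =
        (List.range M).foldl
          (fun r k => if t.testBit k then
              PySem.Int.bor r ((1 : Int) <<< (PySem.List.pyGetD mapping (k : Int) 0).toNat)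
            else r) r := by
  intro t
  induction t using Nat.strong_induction_on with
  | _ t ih =>
    intro hlt r
    by_cases ht0 : t = 0
    · subst ht0
      rw [pvPermLoop]
      simp only [Nat.cast_zero]
      exact (pv_foldl_skip _ _ _ r (fun i _ => Nat.zero_testBit i)).symm
    · -- t = 2^k * o, o odd
      obtain ⟨k, o, ho2, rfl⟩ := Nat.exists_eq_pow_mul_and_not_dvd ht0 2 (by norm_num)
      have ho : o % 2 = 1 := by omega
      set t := 2 ^ k * o with hteq
      have htpos : 0 < t := Nat.pos_of_ne_zero ht0
      have htbk : t.testBit k = true := by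
        rw [pv_testBit_mul]
        simp [Nat.mod_two_eq_one_iff_testBit_zero.mp ho]
      have hkM : k < M := by
        have h1 : 2 ^ k ≤ t := Nat.ge_two_pow_of_testBit htbk
        exact (Nat.pow_lt_pow_iff_right (by norm_num)).mp (Nat.lt_of_le_of_lt h1 hlt)
      -- unfold one iteration of the while loop
      rw [pvPermLoop]
      rw [dif_neg (by exact_mod_cast Nat.not_le.mpr htpos : ¬ ((t : Int) ≤ 0))]
      rw [pv_band_neg t htpos, pv_sub_land_pred k o ho, pv_bitLength_two_pow k]
      simp only [Nat.add_sub_cancel]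
      rw [pv_band_natCast_pred t htpos, pv_land_pred k o ho]
      set t' := 2 ^ k * (o - 1) with ht'eq
      have ht'bits_le : ∀ j, j ≤ k → t'.testBit j = false := by
        intro j hj
        rw [ht'eq, pv_testBit_mul]
        by_cases h : j < k
        · simp [h]
        · have hjk : j = k := by omega
          subst hjk
          simp [Nat.mod_two_eq_zero_iff_testBit_zero.mp (by omega : (o-1) % 2 = 0)]
      have ht'bits_gt : ∀ j, k < j → t'.testBit j = t.testBit j := by
        intro j hj
        rw [ht'eq, hteq, pv_testBit_mul, pv_testBit_mul]
        simp only [if_neg (by omega : ¬ j < k)]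
        exact (pv_testBit_odd_succ o (j - k) ho (by omega)).symm
      have htbits_lt : ∀ j, j < k → t.testBit j = false := by
        intro j hj; rw [hteq, pv_testBit_mul]; simp [hj]
      have ht'lt : t' < t := by
        have : t' = t - 2 ^ k := by
          rw [ht'eq, hteq, Nat.mul_sub, Nat.mul_one]
        have h1 : 2 ^ k ≤ t := Nat.ge_two_pow_of_testBit htbk
        have h2 : 0 < 2 ^ k := by positivity
        omega
      rw [ih t' ht'lt (lt_of_le_of_lt (le_of_lt ht'lt) hlt)]
      -- now pure fold bookkeeping: split the range at k
      set w : Nat → Int := fun k => (1 : Int) <<< (PySem.List.pyGetD mapping (k : Int) 0).toNat with hw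
      set r' := PySem.Int.bor r (w k) with hr'
      have hsplit : List.range M = List.range' 0 k ++ (k :: List.range' (k + 1) (M - k - 1)) := by
        rw [List.range_eq_range']
        have h1 : List.range' 0 k ++ List.range' (0 + 1 * k) (M - k) = List.range' 0 (k + (M - k)) :=
          List.range'_append
        have h2 : M - k = (M - k - 1) + 1 := by omega
        have h3 : k + (M - k - 1 + 1) = M := by omega
        rw [h2] at h1
        rw [← h3, ← h1, List.range'_succ]
        simp
      rw [hsplit, List.foldl_append, List.foldl_append]
      have hpre' : (List.range' 0 k).foldl
          (fun r j => if t'.testBit j then PySem.Int.bor r (w j) else r) r' = r' :=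
        pv_foldl_skip _ _ _ r' (fun i hi => ht'bits_le i (by
          rcases List.mem_range'_1.mp hi with ⟨_, h⟩; omega))
      have hpre : (List.range' 0 k).foldl
          (fun r j => if t.testBit j then PySem.Int.bor r (w j) else r) r = r :=
        pv_foldl_skip _ _ _ r (fun i hi => htbits_lt i (by
          rcases List.mem_range'_1.mp hi with ⟨_, h⟩; omega))
      rw [hpre', hpre]
      simp only [List.foldl_cons, ht'bits_le k (le_refl k), htbk, Bool.false_eq_true,
        if_false, if_true]
      rw [← hr']
      exact pv_foldl_cond_congr _ _ _ _ r' (fun i hi => ht'bits_gt i (by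
        rcases List.mem_range'_1.mp hi with ⟨h, _⟩; omega))

-- proof-side name for the (identical) inner index-permuting fold of the two ports
def pvF (perm : List Int) (n : Int) (i : Int) : Int :=
  (PySem.List.pyRange 0 n 1).foldl
    (fun (j p : Int) => if PySem.Int.band (i >>> (PySem.List.pyGetD perm p 0).toNat) 1 ≠ 0
                        then PySem.Int.bor j ((1 : Int) <<< p.toNat) else j) 0

theorem pv_foldl_append_map {α β : Type} (f : α → β) :
    ∀ (l : List α) (acc : List β), l.foldl (fun m i => m ++ [f i]) acc = acc ++ l.map f := by
  intro l
  induction l with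
  | nil => simp
  | cons x xs ih => intro acc; simp [ih]

theorem pv_buildPermMap_eq (n : Int) (perm : List Int) :
    pvBuildPermMap n perm = (PySem.List.pyRange 0 ((1 : Int) <<< n.toNat) 1).map (pvF perm n) := by
  unfold pvBuildPermMap pvF
  simpa using pv_foldl_append_map _ _ []

theorem pv_shift_one (m : Nat) : ((1 : Int) <<< m) = ((2 ^ m : Nat) : Int) := by
  rw [Int.shiftLeft_eq]
  push_cast
  ring

theorem pv_lt_two_pow_of_pre (t M : Nat) (hM : 1 ≤ M)
    (h : t.log2 = 0 ∨ t.log2.log2 < M.log2) (hM2 : M = 2 ^ M.log2) : t < 2 ^ M := by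
  by_cases ht1 : t < 2
  · calc t < 2 := ht1
      _ = 2 ^ 1 := rfl
      _ ≤ 2 ^ M := Nat.pow_le_pow_right (by norm_num) hM
  · have ht0 : t ≠ 0 := by omega
    have hl1 : 1 ≤ t.log2 := by
      by_contra hc
      have h2 : t < 2 ^ 1 := (Nat.log2_lt ht0 (k := 1)).mp (by omega)
      exact ht1 (by omega)
    rcases h with h | h
    · omega
    · have : t.log2 < 2 ^ M.log2 := (Nat.log2_lt (by omega)).mp h
      rw [← hM2] at this
      exact (Nat.log2_lt ht0).mp this

theorem pv_cond_iff (t k : Nat) :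
    (PySem.Int.band ((t : Int) >>> k) 1 ≠ 0) ↔ t.testBit k = true := by
  rw [← pv_cond_testBit t k]
  simp

-- ===== VERDICT (by name: the statement is the Claim_ definition above) =====
theorem permute_tt_spec : Claim_equal_permute_tt := by
  intro tt perm n _hdom hpre
  obtain ⟨htt, hn, _hlen, _hperm, hlog⟩ := hpre
  unfold Spec_permute_tt permute_tt permute_tt_alt
  set M : Nat := 2 ^ n.toNat with hM
  have hMlog : M.log2 = n.toNat := by rw [hM, Nat.log2_two_pow]
  set t : Nat := tt.toNat with htdef
  have htcast : tt = (t : Int) := by omega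
  have htlt : t < 2 ^ M := by
    apply pv_lt_two_pow_of_pre t M (Nat.one_le_two_pow)
    · rw [hMlog]; exact hlog
    · rw [hMlog]
  -- A side: while-loop = fold over range M
  rw [htcast, pv_loop_eq (pvBuildPermMap n perm) M t htlt 0]
  -- replace the table lookup by the inline computation
  have hmapget : ∀ k : Nat, k < M →
      PySem.List.pyGetD (pvBuildPermMap n perm) (k : Int) 0 = pvF perm n (k : Int) := by
    intro k hk
    rw [pv_buildPermMap_eq, pv_shift_one]
    exact PySem.List.pyGetD_map_pyRange (pvF perm n) M k 0 hk
  rw [PySem.List.foldl_congr_mem _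
    (fun r k => if t.testBit k then
        PySem.Int.bor r ((1 : Int) <<< (PySem.List.pyGetD (pvBuildPermMap n perm) (k : Int) 0).toNat)
      else r)
    (fun r k => if t.testBit k then
        PySem.Int.bor r ((1 : Int) <<< (pvF perm n (k : Int)).toNat) else r) 0
    (fun acc k hk => by simp only [hmapget k (List.mem_range.mp hk)])]
  -- B side: fold over pyRange = the same fold over range M
  rw [pv_shift_one, PySem.List.pyRange_zero_nat, List.foldl_map]
  apply Eq.symm
  apply PySem.List.foldl_congr_mem
  intro acc k _
  show (if PySem.Int.band ((t : Int) >>> ((k : Int)).toNat) 1 ≠ 0 then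
          PySem.Int.bor acc ((1 : Int) <<< (pvF perm n (k : Int)).toNat) else acc) = _
  rw [Int.toNat_natCast]
  by_cases hb : t.testBit k = true
  · rw [if_pos ((pv_cond_iff t k).mpr hb), if_pos hb]
  · rw [if_neg (fun hc => hb ((pv_cond_iff t k).mp hc)), if_neg hb]
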